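-- pv_equiv track=rewrite | github.com/HarryRussin/ramslab-tools | programs/pyTessaract/segment_digit_recognition.py | format_clock_string
-- ===== SOURCE A (Python) =====
-- def format_clock_string(digits: list[str]) -> str:
--     """Format recognized digits into a readable clock-like string."""
--     clean = "".join(d for d in digits if d.isdigit())
--
--     if len(clean) == 4:
--         return f"{clean[:2]}:{clean[2:]}"
--     if len(clean) == 3:
--         return f"{clean[0]}:{clean[1:]}"
--     if len(clean) == 2:
--         return f"{clean[0]}:{clean[1]}"
--     return clean
-- ===== SOURCE B (Python) =====
-- def format_clock_string(digits: list[str]) -> str: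
--     """Format recognized digits into a readable clock-like string."""
--     chars = [c for d in digits if d.isdigit() for c in d]
--     if not 2 <= len(chars) <= 4:
--         return "".join(chars)
--     out = []
--     placed = False
--     remaining = len(chars)
--     for c in chars:
--         if not placed and out and remaining <= 2:
--             out.append(":")
--             placed = True
--         out.append(c)
--         remaining -= 1
--     return "".join(out)
-- ===== Notes on version B (the rewrite author's own statement) =====
-- stated objective: alternative
-- what changed: Replaces A's length case-analysis with slicing by a single left-to-right streaming pass over the digit characters with a countdown accumulator that emits the colon once when at most two characters remain.
import Mathlib
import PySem

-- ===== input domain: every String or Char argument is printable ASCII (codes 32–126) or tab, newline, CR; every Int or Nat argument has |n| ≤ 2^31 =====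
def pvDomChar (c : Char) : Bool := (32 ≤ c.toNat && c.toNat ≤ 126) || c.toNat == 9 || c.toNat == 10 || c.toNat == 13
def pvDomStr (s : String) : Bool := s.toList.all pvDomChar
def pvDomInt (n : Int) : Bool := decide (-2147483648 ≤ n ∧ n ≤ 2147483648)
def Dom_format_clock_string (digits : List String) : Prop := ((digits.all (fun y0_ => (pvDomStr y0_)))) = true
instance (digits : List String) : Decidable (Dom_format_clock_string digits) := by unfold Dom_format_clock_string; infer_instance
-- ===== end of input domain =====

-- B builds the output in one streaming pass with a countdown instead of A's length branches with slices; same return value.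
-- ===== PORT A =====
-- clean = "".join(d for d in digits if d.isdigit()); then the if-ladder on len(clean),
-- f-strings built as char lists (Lean's String append is kernel-opaque).
def format_clock_string (digits : List String) : String :=
  let clean := PySem.Str.join "" (digits.filter (fun d => PySem.Str.strIsdigit d))
  let cs := clean.toList
  if cs.length = 4 then
    String.ofList (PySem.List.slice cs none (some 2) ++ ':' :: PySem.List.slice cs (some 2) none)
  else if cs.length = 3 then
    String.ofList (PySem.List.pyGetD cs 0 ' ' :: ':' :: PySem.List.slice cs (some 1) none)
  else if cs.length = 2 then
    String.ofList (PySem.List.pyGetD cs 0 ' ' :: ':' :: [PySem.List.pyGetD cs 1 ' '])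
  else clean

-- ===== PORT B =====
-- chars = [c for d in digits if d.isdigit() for c in d]; pass-through unless 2 <= len <= 4;
-- else one left-to-right fold with state (out, placed, remaining) emitting ':' once when remaining <= 2.
def format_clock_string_alt (digits : List String) : String :=
  let chars := (digits.filter (fun d => PySem.Str.strIsdigit d)).flatMap String.toList
  if ¬ (2 ≤ chars.length ∧ chars.length ≤ 4) then String.ofList chars
  else
    let res := chars.foldl
      (fun (s : List Char × Bool × Nat) c =>
        if ¬ s.2.1 ∧ s.1 ≠ [] ∧ s.2.2 ≤ 2 then (s.1 ++ [':'] ++ [c], true, s.2.2 - 1)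
        else (s.1 ++ [c], s.2.1, s.2.2 - 1))
      (([] : List Char), false, chars.length)
    String.ofList res.1

-- ===== PRECONDITION & SPEC =====
def Spec_format_clock_string (digits : List String) (out : String) : Prop := out = format_clock_string_alt digits
instance (digits : List String) (out : String) : Decidable (Spec_format_clock_string digits out) := by unfold Spec_format_clock_string; infer_instance

-- ===== CLAIM =====
def Claim_equal_format_clock_string : Prop := ∀ (digits : List String), Dom_format_clock_string digits → Spec_format_clock_string digits (format_clock_string digits)

-- ===== LEMMAS AND PROOFS =====

-- Both ports work on the same character list: join "" = flatMap toList.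
theorem intercalate_nil_flatten {α : Type} (L : List (List α)) :
    List.intercalate [] L = L.flatten := by
  induction L with
  | nil => rfl
  | cons x xs ih =>
    cases xs with
    | nil => simp [List.intercalate, List.intersperse]
    | cons y t =>
      rw [show List.intercalate ([] : List α) (x :: y :: t)
            = x ++ [] ++ List.intercalate [] (y :: t) from by
          simp [List.intercalate, List.intersperse], ih]
      simp

theorem clean_toList (l : List String) :
    (PySem.Str.join "" l).toList = l.flatMap String.toList := by
  simp [PySem.Str.toList_join, PySem.Chars.join, intercalate_nil_flatten, List.flatMap]

theorem format_clock_string_core (digits : List String) :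
    format_clock_string digits = format_clock_string_alt digits := by
  simp only [format_clock_string, format_clock_string_alt, ← clean_toList]
  generalize h : (PySem.Str.join "" (digits.filter (fun d => PySem.Str.strIsdigit d))) = clean
  have hof : String.ofList clean.toList = clean := by simp
  generalize clean.toList = cs at hof ⊢
  rcases cs with _ | ⟨a, _ | ⟨b, _ | ⟨c, _ | ⟨d, _ | ⟨e, t⟩⟩⟩⟩⟩
  · simpa using hof.symm
  · simpa using hof.symm
  · simp [PySem.List.slice, PySem.List.clampIdx, PySem.List.pyGetD, PySem.List.pyGet?,
      PySem.List.pyIdx?, List.foldl]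
  · simp [PySem.List.slice, PySem.List.clampIdx, PySem.List.pyGetD, PySem.List.pyGet?,
      PySem.List.pyIdx?, List.foldl]
  · simp [PySem.List.slice, PySem.List.clampIdx, PySem.List.pyGetD, PySem.List.pyGet?,
      PySem.List.pyIdx?, List.foldl]
  · have h2 : ¬ ((a :: b :: c :: d :: e :: t).length = 4) := by simp
    have h3 : ¬ ((a :: b :: c :: d :: e :: t).length = 3) := by simp
    have h4 : ¬ ((a :: b :: c :: d :: e :: t).length = 2) := by simp
    have h5 : ¬ (2 ≤ (a :: b :: c :: d :: e :: t).length ∧ (a :: b :: c :: d :: e :: t).length ≤ 4) := by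
      simp
    rw [if_neg h2, if_neg h3, if_neg h4, if_pos h5]
    exact hof.symm

-- ===== VERDICT =====
theorem format_clock_string_spec : Claim_equal_format_clock_string := by
  intro digits _
  exact format_clock_string_core digits
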